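-- pv_equiv track=rewrite | github.com/hhebb/algorithm | week_7/최고의 집합.py | solution
-- ===== SOURCE A (Python) =====
-- def solution(n, s):
--     a, b = divmod(s, n)
--     if a < 1:
--         return [-1]
--     answer = [a for i in range(n)]
--     for c in range(n-1, n-1-b, -1):
--         answer[c] += 1
--     return answer
-- ===== SOURCE B (Python) =====
-- def solution(n, s):
--     if n < 1:
--         return [-1]
--     out = []
--     while n > 0:
--         x = s // n
--         if x < 1:
--             return [-1]
--         out.append(x)
--         s -= x
--         n -= 1
--     return out
-- ===== Notes on version B (the rewrite author's own statement) =====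
-- stated objective: alternative
-- what changed: Replaces divmod-once-then-patch-the-tail by a per-element greedy loop: each element is the floor of the remaining sum over the remaining count, subtracted as it goes, so no uniform list is allocated and no tail is patched.
-- intended difference: For n < 0 with s <= n, A's negative-length ranges make it return the empty list [] although a set of negative size cannot exist; B returns the failure value [-1], which is the intended answer for an impossible count. — e.g. on solution(-2, -4): A returns [], B returns [-1]
import Mathlib
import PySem

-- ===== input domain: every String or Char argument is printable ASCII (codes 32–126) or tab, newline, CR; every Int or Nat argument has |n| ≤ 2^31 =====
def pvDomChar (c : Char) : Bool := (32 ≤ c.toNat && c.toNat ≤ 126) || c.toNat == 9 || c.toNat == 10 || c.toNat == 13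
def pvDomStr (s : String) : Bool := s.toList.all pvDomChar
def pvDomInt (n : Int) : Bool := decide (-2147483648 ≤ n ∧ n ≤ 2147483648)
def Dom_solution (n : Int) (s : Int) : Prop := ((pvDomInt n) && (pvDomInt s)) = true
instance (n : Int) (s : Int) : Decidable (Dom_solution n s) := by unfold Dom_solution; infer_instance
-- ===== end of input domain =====

-- B computes each element greedily as floor(remaining/count) in a single subtracting loop instead of
-- A's divmod-once + patch-the-tail construction (objective: alternative, same cost).

-- ===== PORT A =====
def solution (n : Int) (s : Int) : List Int :=
  let a := PySem.Int.floordiv s n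
  let b := PySem.Int.mod s n
  if a < 1 then [-1]
  else
    let answer := (PySem.List.pyRange 0 n 1).map (fun _ => a)
    (PySem.List.pyRange (n - 1) (n - 1 - b) (-1)).foldl
      (fun ans c => PySem.List.pySetD ans c (PySem.List.pyGetD ans c 0 + 1)) answer

-- ===== PORT B =====
-- the while-loop of Source B: k iterations remain (k = current n), s is the remaining sum, acc is `out`
def solAltLoop : Nat → Int → List Int → List Int
  | 0, _, acc => acc
  | (k+1), s, acc =>
      let x := PySem.Int.floordiv s ((k : Int) + 1)
      if x < 1 then [-1]
      else solAltLoop k (s - x) (acc ++ [x])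

def solution_alt (n : Int) (s : Int) : List Int :=
  if n < 1 then [-1] else solAltLoop n.toNat s []

-- ===== PRECONDITION & SPEC =====
-- Pre_ excludes exactly n = 0, on which A raises ZeroDivisionError.
def Pre_solution (n : Int) (s : Int) : Prop := n ≠ 0
instance (n : Int) (s : Int) : Decidable (Pre_solution n s) := by unfold Pre_solution; infer_instance
def pvWitness_solution : Int × Int := (5, 17)

-- For n < 0 with s ≤ n, A's negative-length ranges make it return [] although a set of negative size
-- cannot exist; B returns the failure value [-1], the intended answer for an impossible count.
def D_solution (n : Int) (s : Int) : Prop := n < 0 ∧ s ≤ n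
instance (n : Int) (s : Int) : Decidable (D_solution n s) := by unfold D_solution; infer_instance

def Spec_solution (n : Int) (s : Int) (out : List Int) : Prop := ¬ D_solution n s → out = solution_alt n s
instance (n : Int) (s : Int) (out : List Int) : Decidable (Spec_solution n s out) := by
  unfold Spec_solution; infer_instance

def pvDiffWitness_solution : Int × Int := (-2, -4)
def pvDiffWitnessOut_solution : (List Int) × (List Int) := ([], [-1])

-- ===== CLAIM (what is proved, stated in full; the proofs are below) =====
def Claim_unchanged_solution : Prop := ∀ (n : Int) (s : Int), Dom_solution n s → Pre_solution n s → Spec_solution n s (solution n s)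
def Claim_changed_solution : Prop := Dom_solution (pvDiffWitness_solution.1) (pvDiffWitness_solution.2) ∧ Pre_solution (pvDiffWitness_solution.1) (pvDiffWitness_solution.2) ∧ D_solution (pvDiffWitness_solution.1) (pvDiffWitness_solution.2) ∧ solution (pvDiffWitness_solution.1) (pvDiffWitness_solution.2) = pvDiffWitnessOut_solution.1 ∧ solution_alt (pvDiffWitness_solution.1) (pvDiffWitness_solution.2) = pvDiffWitnessOut_solution.2 ∧ pvDiffWitnessOut_solution.1 ≠ pvDiffWitnessOut_solution.2
def Claim_exact_solution : Prop := ∀ (n : Int) (s : Int), Dom_solution n s → Pre_solution n s → D_solution n s → solution n s ≠ solution_alt n s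

-- ===== LEMMAS AND PROOFS =====

-- A-side: setting the last slot of the leading replicate-block to v moves it to the second block
theorem set_replicate_last (j : Nat) (a v : Int) :
    (List.replicate (j + 1) a).set j v = List.replicate j a ++ [v] := by
  induction j with
  | zero => rfl
  | succ j ih =>
    show a :: (List.replicate (j + 1) a).set j v = _
    rw [ih]; rfl

-- A-side: the patch loop turns the last k copies of a into a+1
theorem inc_fold (m : Nat) (a : Int) (k : Nat) (hk : k ≤ m) :
    (List.range k).foldl
      (fun (ans : List Int) (i : Nat) =>
        PySem.List.pySetD ans ((m : Int) - 1 - (i : Int))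
          (PySem.List.pyGetD ans ((m : Int) - 1 - (i : Int)) 0 + 1))
      (List.replicate m a)
    = List.replicate (m - k) a ++ List.replicate k (a + 1) := by
  induction k with
  | zero => simp
  | succ k ih =>
    rw [List.range_succ, List.foldl_append, ih (by omega)]
    simp only [List.foldl_cons, List.foldl_nil]
    have hc : ((m : Int) - 1 - (k : Int)) = ((m - 1 - k : Nat) : Int) := by omega
    have hidx : m - 1 - k < m - k := by omega
    rw [hc, PySem.List.pySetD_natCast]
    have hget : PySem.List.pyGetD (List.replicate (m - k) a ++ List.replicate k (a + 1))
        ((m - 1 - k : Nat) : Int) 0 = a := by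
      rw [PySem.List.pyGetD_natCast]
      rw [List.getD_eq_getElem?_getD, List.getElem?_append_left (by simp; omega)]
      simp [hidx]
    rw [hget, List.set_append_left _ _ (by simp; omega)]
    have h1 : m - k = (m - 1 - k) + 1 := by omega
    rw [h1, set_replicate_last]
    have h2 : m - (k + 1) = m - 1 - k := by omega
    rw [h2, List.append_assoc]
    rfl

-- B-side: the greedy loop produces the two replicate blocks
theorem greedy_eq (m : Nat) : ∀ (s : Int) (acc : List Int),
    1 ≤ PySem.Int.floordiv s ((m : Int) + 1) →
    solAltLoop (m + 1) s acc
      = acc ++ (List.replicate ((m + 1) - (PySem.Int.mod s ((m : Int) + 1)).toNat)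
                  (PySem.Int.floordiv s ((m : Int) + 1))
              ++ List.replicate ((PySem.Int.mod s ((m : Int) + 1)).toNat)
                  (PySem.Int.floordiv s ((m : Int) + 1) + 1)) := by
  induction m with
  | zero =>
    intro s acc h
    have hd : PySem.Int.floordiv s 1 = s := by
      rw [PySem.Int.floordiv_eq_ediv_of_pos (by omega)]; simp
    have hm : PySem.Int.mod s 1 = 0 := by
      rw [PySem.Int.mod_eq_emod_of_pos (by omega)]; simp
    simp only [Nat.cast_zero, zero_add] at *
    rw [hd] at h
    simp [solAltLoop, not_lt.2 h]
  | succ m ih =>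
    intro s acc h
    simp only [Nat.cast_add, Nat.cast_one] at h ⊢
    set a := PySem.Int.floordiv s ((m : Int) + 1 + 1) with ha
    set b := PySem.Int.mod s ((m : Int) + 1 + 1) with hb
    have hpos : (0 : Int) < (m : Int) + 1 + 1 := by omega
    have hsum : a * ((m : Int) + 1 + 1) + b = s := PySem.Int.floordiv_mul_add_mod s _
    have hb0 : 0 ≤ b := PySem.Int.mod_nonneg s hpos
    have hblt : b < (m : Int) + 1 + 1 := PySem.Int.mod_lt s hpos
    have hstep : solAltLoop (m + 1 + 1) s acc = solAltLoop (m + 1) (s - a) (acc ++ [a]) := by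
      show (if a < 1 then [-1] else solAltLoop (m + 1) (s - a) (acc ++ [a])) = _
      rw [if_neg (by omega)]
    by_cases hcase : b ≤ (m : Int)
    · -- remainder fits in the smaller problem: quotient and remainder unchanged
      have ha' : PySem.Int.floordiv (s - a) ((m : Int) + 1) = a := by
        rw [PySem.Int.floordiv_eq_iff_of_pos (by omega : (0:Int) < (m:Int)+1)]
        constructor <;> nlinarith
      have hb' : PySem.Int.mod (s - a) ((m : Int) + 1) = b := by
        have := PySem.Int.floordiv_mul_add_mod (s - a) ((m : Int) + 1)
        rw [ha'] at this; nlinarith [this, hsum]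
      rw [hstep, ih (s - a) (acc ++ [a]) (by rw [ha']; omega)]
      rw [ha', hb']
      have hlt : b.toNat ≤ m := by omega
      have hrep : m + 1 + 1 - b.toNat = (m + 1 - b.toNat) + 1 := by omega
      rw [hrep]
      simp [List.replicate_succ, List.append_assoc]
    · -- remainder = m+1: the smaller problem divides evenly at a+1
      have hbeq : b = (m : Int) + 1 := by omega
      have ha' : PySem.Int.floordiv (s - a) ((m : Int) + 1) = a + 1 := by
        rw [PySem.Int.floordiv_eq_iff_of_pos (by omega : (0:Int) < (m:Int)+1)]
        constructor <;> nlinarith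
      have hb' : PySem.Int.mod (s - a) ((m : Int) + 1) = 0 := by
        have := PySem.Int.floordiv_mul_add_mod (s - a) ((m : Int) + 1)
        rw [ha'] at this; nlinarith [this, hsum, hbeq]
      rw [hstep, ih (s - a) (acc ++ [a]) (by rw [ha']; omega)]
      rw [ha', hb', hbeq]
      have h1 : ((m : Int) + 1).toNat = m + 1 := by omega
      rw [h1]
      simp [List.replicate_succ, List.append_assoc]

-- ===== VERDICT (by name: the statements are the Claim_ definitions above) =====
theorem solution_spec : Claim_unchanged_solution := by
  intro n s _ hpre hnd
  unfold solution solution_alt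
  simp only []
  set a := PySem.Int.floordiv s n with ha
  set b := PySem.Int.mod s n with hb
  rcases lt_or_gt_of_ne hpre with hn | hn
  · -- n < 0; ¬D_ gives n < s, hence a < 1 and both sides are [-1]
    have hs : n < s := by
      by_contra hc
      exact hnd ⟨hn, by omega⟩
    have hsum : a * n + b = s := PySem.Int.floordiv_mul_add_mod s n
    have hbb : n < b ∧ b ≤ 0 := PySem.Int.mod_neg_bounds s hn
    have hA : a < 1 := by nlinarith [hbb.1, hbb.2]
    rw [if_pos hA, if_pos (by omega : n < 1)]
  · -- n > 0
    have hb0 : 0 ≤ b := PySem.Int.mod_nonneg s hn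
    have hblt : b < n := PySem.Int.mod_lt s hn
    obtain ⟨k, hk⟩ : ∃ k, n.toNat = k + 1 := ⟨n.toNat - 1, by omega⟩
    have hkc : ((k : Int) + 1) = n := by omega
    rw [if_neg (by omega : ¬ n < 1), hk]
    by_cases hA : a < 1
    · rw [if_pos hA]
      show _ = (if PySem.Int.floordiv s ((k : Int) + 1) < 1 then [-1] else _)
      rw [hkc, ← ha, if_pos hA]
    · rw [if_neg hA]
      -- A side: replicate then patch
      have hinit : (PySem.List.pyRange 0 n 1).map (fun _ => a) = List.replicate n.toNat a := by
        rw [List.map_const']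
        simp [PySem.List.length_pyRange_one]
      have hrange : PySem.List.pyRange (n - 1) (n - 1 - b) (-1)
          = (List.range b.toNat).map (fun (i : Nat) => (n.toNat : Int) - 1 - (i : Int)) := by
        rw [PySem.List.pyRange_neg_one]
        have h1 : (n - 1 - (n - 1 - b)).toNat = b.toNat := by omega
        rw [h1]
        apply List.map_congr_left
        intro i hi
        simp only [List.mem_range] at hi
        omega
      rw [hinit, hrange, List.foldl_map, inc_fold n.toNat a b.toNat (by omega)]
      -- B side: greedy loop
      rw [greedy_eq k s [] (by rw [hkc, ← ha]; omega)]
      rw [hkc, ← ha, ← hb]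
      simp [hk]

theorem solution_changed : Claim_changed_solution := by
  unfold Claim_changed_solution; decide

theorem solution_tight : Claim_exact_solution := by
  intro n s _ hpre ⟨hn, hs⟩
  unfold solution solution_alt
  set a := PySem.Int.floordiv s n with ha
  set b := PySem.Int.mod s n with hb
  have hsum : a * n + b = s := PySem.Int.floordiv_mul_add_mod s n
  have hbb : n < b ∧ b ≤ 0 := PySem.Int.mod_neg_bounds s hn
  have hA : ¬ a < 1 := by
    intro hc
    nlinarith [hbb.1, hbb.2]
  rw [if_neg hA, if_pos (by omega : n < 1)]
  rw [PySem.List.pyRange_one_eq_nil (by omega : n ≤ 0)]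
  rw [PySem.List.pyRange_neg_one_eq_nil (by omega : n - 1 ≤ n - 1 - b)]
  simp
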